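-- pv_equiv track=rewrite | github.com/thealper2/codewars-solutions | 7-kyu/last_digit_to_appear_in_sequence_of_powers.py | ldta
-- ===== SOURCE A (Python) =====
-- def ldta(n):
--     seen = set()
--     counter = 0
--     power = 1
--
--     while counter < 100:
--         total = n**power
--         digits = list(map(int, list(str(total))))
--
--         for digit in digits:
--             if digit not in seen:
--                 if len(seen) == 9:
--                     return digit
--                 else:
--                     seen.add(digit)
--
--         counter += 1
--         power += 1
-- ===== SOURCE B (Python) =====
-- def ldta(n):
--     digits = [int(c) for p in range(1, 101) for c in str(n**p)]
--     order = list(dict.fromkeys(digits))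
--     return order[9] if len(order) > 9 else None
-- ===== Notes on version B (the rewrite author's own statement) =====
-- stated objective: simpler
-- what changed: Replaces A's stateful while-loop with mid-stream early return by a three-line pipeline: build the whole digit stream of n**p for p=1..100, dedup it preserving first-occurrence order (dict.fromkeys), and index the 10th distinct digit.
import Mathlib
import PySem

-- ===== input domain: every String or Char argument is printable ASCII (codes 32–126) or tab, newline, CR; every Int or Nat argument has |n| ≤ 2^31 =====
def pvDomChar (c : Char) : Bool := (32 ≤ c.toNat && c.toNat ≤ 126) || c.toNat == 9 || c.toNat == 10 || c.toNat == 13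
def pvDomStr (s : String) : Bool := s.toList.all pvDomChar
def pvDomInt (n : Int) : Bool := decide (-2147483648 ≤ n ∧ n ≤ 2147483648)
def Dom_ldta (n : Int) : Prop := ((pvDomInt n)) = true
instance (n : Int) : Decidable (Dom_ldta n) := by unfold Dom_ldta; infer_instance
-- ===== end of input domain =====

-- B replaces A's stateful while-loop with early return by a pipeline:
-- full digit stream for p=1..100, ordered dedup, index the 10th distinct digit (objective: simpler).

-- ===== PORT A =====

-- digits of n**p: list(map(int, list(str(n**p)))).  int(c) is ported as c.toNat - 48,
-- exact for digit characters; Pre_ldta (0 ≤ n) guarantees str(n**p) is all digits.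
def ldtaChunk (n : Int) (power : Int) : List Int :=
  (PySem.Int.toStr (n ^ power.toNat)).toList.map (fun c => ((c.toNat : Int) - 48))

-- the 'for digit in digits' loop with its early return: .inr d = 'return digit'
def ldtaInner (s : PySem.Set Int) : List Int → (PySem.Set Int) ⊕ Int
  | [] => .inl s
  | d :: ds =>
    if ¬ PySem.Set.contains s d then
      if PySem.Set.len s = 9 then .inr d
      else ldtaInner (PySem.Set.add s d) ds
    else ldtaInner s ds

-- 'while counter < 100': fuel = 100 - counter
def ldtaLoop (n : Int) : Nat → Int → PySem.Set Int → Option Int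
  | 0, _, _ => none
  | k + 1, power, seen =>
    match ldtaInner seen (ldtaChunk n power) with
    | .inr d => some d
    | .inl s => ldtaLoop n k (power + 1) s

def ldta (n : Int) : Option Int :=
  ldtaLoop n 100 1 PySem.Set.empty

-- ===== PORT B =====

-- digits = [int(c) for p in range(1, 101) for c in str(n**p)]
def ldtaDigitsB (n : Int) : List Int :=
  (PySem.List.pyRange 1 101 1).flatMap
    (fun p => (PySem.Int.toStr (n ^ p.toNat)).toList.map (fun c => ((c.toNat : Int) - 48)))

-- order = list(dict.fromkeys(digits))
def ldtaOrderB (n : Int) : List Int := PySem.List.dedup (ldtaDigitsB n)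

def ldta_alt (n : Int) : Option Int :=
  if PySem.List.len (ldtaOrderB n) > 9 then PySem.List.pyGet? (ldtaOrderB n) 9 else none

-- ===== PRECONDITION & SPEC =====
-- Pre_ excludes negative n, on which the Python A raises ValueError (int on the sign
-- character of str(n**p)); B raises identically there.
def Pre_ldta (n : Int) : Prop := 0 ≤ n
instance (n : Int) : Decidable (Pre_ldta n) := by unfold Pre_ldta; infer_instance
def pvWitness_ldta : Int := 7

def Spec_ldta (n : Int) (out : Option Int) : Prop := out = ldta_alt n
instance (n : Int) (out : Option Int) : Decidable (Spec_ldta n out) := by unfold Spec_ldta; infer_instance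

-- ===== CLAIM (what is proved, stated in full; the proofs are below) =====
def Claim_equal_ldta : Prop := ∀ (n : Int), Dom_ldta n → Pre_ldta n → Spec_ldta n (ldta n)

-- ===== LEMMAS AND PROOFS =====

-- the digit stream A consumes: chunks for k consecutive powers starting at 'power'
def ldtaStream (n : Int) : Int → Nat → List Int
  | _, 0 => []
  | power, k + 1 => ldtaChunk n power ++ ldtaStream n (power + 1) k

-- the inner loop, started at ≤ 9 seen digits, is decided by element 9 of the updated set
theorem ldtaInner_eq (ds : List Int) : ∀ (s : PySem.Set Int), s.length ≤ 9 →
    ldtaInner s ds = match (PySem.Set.update s ds)[9]? with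
      | some d => .inr d
      | none => .inl (PySem.Set.update s ds) := by
  induction ds with
  | nil =>
    intro s hs
    simp [ldtaInner, PySem.Set.update_nil, List.getElem?_eq_none (by omega : 9 ≥ s.length)]
  | cons d ds ih =>
    intro s hs
    rw [PySem.Set.update_cons]
    by_cases hmem : d ∈ s
    · have hc : PySem.Set.contains s d = true := (PySem.Set.contains_iff s d).mpr hmem
      have hadd : PySem.Set.add s d = s := by rw [PySem.Set.add_eq_ite]; simp [hmem]
      rw [show ldtaInner s (d :: ds)
          = if ¬ PySem.Set.contains s d then
              (if PySem.Set.len s = 9 then .inr d else ldtaInner (PySem.Set.add s d) ds)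
            else ldtaInner s ds from rfl]
      rw [hc, hadd]
      simpa using ih s hs
    · have hc : PySem.Set.contains s d = false := by
        cases h : PySem.Set.contains s d
        · rfl
        · exact absurd ((PySem.Set.contains_iff s d).mp h) hmem
      have hadd : PySem.Set.add s d = s ++ [d] := by
        rw [PySem.Set.add_eq_ite]; simp [hmem]
      rw [show ldtaInner s (d :: ds)
          = if ¬ PySem.Set.contains s d then
              (if PySem.Set.len s = 9 then .inr d else ldtaInner (PySem.Set.add s d) ds)
            else ldtaInner s ds from rfl]
      rw [hc, hadd]
      by_cases h9 : s.length = 9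
      · have hlen9 : PySem.Set.len s = 9 := by
          simp [PySem.Set.len, h9]
        have hget : (PySem.Set.update (s ++ [d]) ds)[9]? = some d := by
          rw [PySem.Set.update_eq_append_filter (s ++ [d]) ds]
          rw [List.getElem?_append_left (by simp [h9] : 9 < (s ++ [d]).length)]
          rw [show (9 : Nat) = s.length from h9.symm,
            List.getElem?_append_right (le_refl _)]
          simp
        rw [hget, if_pos (by simp), if_pos hlen9]
      · have hlen : ¬ PySem.Set.len s = 9 := by
          simp only [PySem.Set.len]
          omega
        rw [if_pos (by simp), if_neg hlen]
        exact ih (s ++ [d]) (by simp; omega)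

-- the while-loop is decided by element 9 of the set updated with the whole remaining stream
theorem ldtaLoop_eq (n : Int) : ∀ (k : Nat) (power : Int) (s : PySem.Set Int),
    s.length ≤ 9 →
    ldtaLoop n k power s = (PySem.Set.update s (ldtaStream n power k))[9]? := by
  intro k
  induction k with
  | zero =>
    intro power s hs
    simp [ldtaLoop, ldtaStream, PySem.Set.update_nil,
      List.getElem?_eq_none (by omega : 9 ≥ s.length)]
  | succ k ih =>
    intro power s hs
    rw [show ldtaStream n power (k + 1) = ldtaChunk n power ++ ldtaStream n (power + 1) k
        from rfl, PySem.Set.update_append]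
    rw [show ldtaLoop n (k + 1) power s
        = (match ldtaInner s (ldtaChunk n power) with
           | .inr d => some d
           | .inl s' => ldtaLoop n k (power + 1) s') from rfl]
    rw [ldtaInner_eq _ s hs]
    cases hget : (PySem.Set.update s (ldtaChunk n power))[9]? with
    | some d =>
      have hlt : 9 < (PySem.Set.update s (ldtaChunk n power)).length :=
        (List.getElem?_eq_some_iff.mp hget).1
      rw [PySem.Set.update_eq_append_filter (PySem.Set.update s (ldtaChunk n power))]
      simp only [List.getElem?_append_left hlt, hget]
    | none =>
      have hle : (PySem.Set.update s (ldtaChunk n power)).length ≤ 9 := by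
        by_contra h
        exact absurd hget (by simp; omega)
      simpa using ih (power + 1) _ hle

-- the flatMap over range(1, 101) in B is exactly A's stream of 100 chunks from power 1
theorem ldta_flatMap_eq (n : Int) : ∀ (k : Nat) (a : Int),
    (PySem.List.pyRange a (a + k) 1).flatMap
      (fun p => (PySem.Int.toStr (n ^ p.toNat)).toList.map (fun c => ((c.toNat : Int) - 48)))
    = ldtaStream n a k := by
  intro k
  induction k with
  | zero =>
    intro a
    simp [ldtaStream]
  | succ k ih =>
    intro a
    rw [PySem.List.pyRange_one_cons (by omega : a < a + (k + 1 : Nat))]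
    rw [List.flatMap_cons]
    rw [show a + ((k + 1 : Nat) : Int) = (a + 1) + (k : Nat) by push_cast; ring]
    rw [ih (a + 1)]
    rfl

-- ===== VERDICT (by name: the statement is the Claim_ definition above) =====
theorem ldta_spec : Claim_equal_ldta := by
  intro n _ _
  unfold Spec_ldta ldta ldta_alt ldtaOrderB ldtaDigitsB
  have h1 : (101 : Int) = 1 + (100 : Nat) := by norm_num
  rw [h1, ldta_flatMap_eq n 100 1]
  rw [ldtaLoop_eq n 100 1 PySem.Set.empty (by simp [PySem.Set.empty])]
  rw [PySem.List.dedup_eq_ofList, ← PySem.Set.update_empty (ldtaStream n 1 100)]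
  set v := PySem.Set.update PySem.Set.empty (ldtaStream n 1 100) with hv
  by_cases h : PySem.List.len v > 9
  · rw [if_pos h, PySem.List.pyGet?_of_nonneg v (by norm_num)]
    rfl
  · rw [if_neg h]
    have hle : v.length ≤ 9 := by
      simp only [PySem.List.len_eq] at h; omega
    simp [List.getElem?_eq_none (by omega : 9 ≥ v.length)]
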